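-- pv_equiv track=rewrite | github.com/lzc199809-cloud/DeepMiRT | deepmirt/evaluation/stratified_eval.py | _extract_primary_evidence
-- ===== SOURCE A (Python) =====
-- def _extract_primary_evidence(evidence_str: str) -> str:
--     """
--     Extract the primary type from an evidence_type string that may contain semicolons.
--
--     Priority: experimental_CLASH > experimental_eCLIP > experimental > synthetic_shuffled
--     """
--     if not isinstance(evidence_str, str) or not evidence_str:
--         return "unknown"
--
--     parts = [p.strip() for p in evidence_str.split(";")]
--
--     # Sort by priority
--     priority = {
--         "experimental_CLASH": 4,
--         "experimental_eCLIP": 3,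
--         "experimental": 2,
--         "synthetic_shuffled": 1,
--     }
--
--     best = "unknown"
--     best_priority = 0
--     for p in parts:
--         if p in priority and priority[p] > best_priority:
--             best = p
--             best_priority = priority[p]
--
--     return best if best != "unknown" else parts[0]
-- ===== SOURCE B (Python) =====
-- def _extract_primary_evidence(evidence_str: str) -> str:
--     """Return the highest-priority evidence type from a semicolon-separated string."""
--     if not isinstance(evidence_str, str) or not evidence_str:
--         return "unknown"
--     parts = [p.strip() for p in evidence_str.split(";")]
--     present = set(parts)
--     for t in ("experimental_CLASH", "experimental_eCLIP", "experimental", "synthetic_shuffled"):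
--         if t in present:
--             return t
--     return parts[0]
-- ===== Notes on version B (the rewrite author's own statement) =====
-- stated objective: idiomatic
-- what changed: Instead of scanning the parts while tracking a running (best, best_priority) maximum against a priority dict, B builds a set of the stripped parts once and walks the fixed priority-ordered tuple of evidence types, returning the first one present (parts[0] as fallback).
import Mathlib
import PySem

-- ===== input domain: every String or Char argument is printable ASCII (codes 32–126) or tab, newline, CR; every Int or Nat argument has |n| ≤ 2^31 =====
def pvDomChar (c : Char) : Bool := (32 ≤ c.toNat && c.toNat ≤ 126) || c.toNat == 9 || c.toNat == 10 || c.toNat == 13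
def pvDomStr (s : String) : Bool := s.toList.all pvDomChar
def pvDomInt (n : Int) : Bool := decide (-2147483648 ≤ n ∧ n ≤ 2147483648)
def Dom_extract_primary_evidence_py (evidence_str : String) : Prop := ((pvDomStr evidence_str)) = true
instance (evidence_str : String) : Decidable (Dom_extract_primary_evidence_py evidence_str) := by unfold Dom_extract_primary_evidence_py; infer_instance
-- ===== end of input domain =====

-- B replaces A's running (best, best_priority) maximum over the parts by a scan of the
-- fixed priority-ordered list of evidence types against a set of the stripped parts (idiomatic).

-- ===== PORT A =====
def pvPriority : PySem.Dict String Int :=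
  ((((PySem.Dict.empty).insert "experimental_CLASH" 4).insert "experimental_eCLIP" 3).insert
      "experimental" 2).insert "synthetic_shuffled" 1

def extract_primary_evidence_py (evidence_str : String) : String :=
  if evidence_str = "" then "unknown"
  else
    let parts := ((PySem.Str.split? evidence_str ";").getD []).map PySem.Str.strip
    let res := parts.foldl
      (fun (st : String × Int) p =>
        if pvPriority.contains p && decide (pvPriority.getD p 0 > st.2) then
          (p, pvPriority.getD p 0)
        else st)
      ("unknown", 0)
    if res.1 ≠ "unknown" then res.1 else (PySem.List.pyGet? parts 0).getD "unknown"

-- ===== PORT B =====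
def pvOrder : List String :=
  ["experimental_CLASH", "experimental_eCLIP", "experimental", "synthetic_shuffled"]

def extract_primary_evidence_py_alt (evidence_str : String) : String :=
  if evidence_str = "" then "unknown"
  else
    let parts := ((PySem.Str.split? evidence_str ";").getD []).map PySem.Str.strip
    let present : PySem.Set String := PySem.Set.ofList parts
    match pvOrder.find? (fun t => PySem.Set.contains present t) with
    | some t => t
    | none => (PySem.List.pyGet? parts 0).getD "unknown"

-- ===== PRECONDITION & SPEC =====
def Spec_extract_primary_evidence_py (evidence_str : String) (out : String) : Prop := out = extract_primary_evidence_py_alt evidence_str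
instance (evidence_str : String) (out : String) : Decidable (Spec_extract_primary_evidence_py evidence_str out) := by unfold Spec_extract_primary_evidence_py; infer_instance

-- ===== CLAIM (what is proved, stated in full; the proofs are below) =====
def Claim_equal_extract_primary_evidence_py : Prop := ∀ (evidence_str : String), Dom_extract_primary_evidence_py evidence_str → Spec_extract_primary_evidence_py evidence_str (extract_primary_evidence_py evidence_str)

-- ===== LEMMAS AND PROOFS =====

def pvPrio (p : String) : Int := pvPriority.getD p 0

def pvKeyOf (v : Int) : String :=
  if v = 4 then "experimental_CLASH"
  else if v = 3 then "experimental_eCLIP"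
  else if v = 2 then "experimental"
  else if v = 1 then "synthetic_shuffled"
  else "unknown"

def pvMax (parts : List String) : Int :=
  parts.foldr (fun p m => max (pvPrio p) m) 0

lemma pvMax_nil : pvMax [] = 0 := rfl

lemma pvMax_cons (p : String) (ps : List String) :
    pvMax (p :: ps) = max (pvPrio p) (pvMax ps) := rfl

lemma pvPrio_cases (p : String) :
    (pvPriority.contains p = true ∧ 0 < pvPrio p ∧ pvPrio p ≤ 4 ∧ p = pvKeyOf (pvPrio p)) ∨
    (pvPriority.contains p = false ∧ pvPrio p = 0) := by
  rcases h : pvPriority.contains p with _ | _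
  · right
    refine ⟨rfl, ?_⟩
    unfold pvPrio
    exact PySem.Dict.getD_of_not_contains (d := pvPriority) (k := p) (d0 := 0) h
  · left
    refine ⟨rfl, ?_⟩
    have hm : p ∈ pvPriority.keys := (PySem.Dict.contains_iff_mem_keys _ _).1 h
    have hk : pvPriority.keys =
        ["experimental_CLASH", "experimental_eCLIP", "experimental", "synthetic_shuffled"] := by
      decide
    rw [hk] at hm
    simp only [List.mem_cons, List.not_mem_nil, or_false] at hm
    rcases hm with rfl | rfl | rfl | rfl <;> refine ⟨by decide, by decide, by decide⟩

lemma pvPrio_le_four (p : String) : pvPrio p ≤ 4 := by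
  rcases pvPrio_cases p with ⟨_, _, h, _⟩ | ⟨_, h⟩ <;> omega

lemma pvMax_nonneg (parts : List String) : 0 ≤ pvMax parts := by
  induction parts with
  | nil => simp [pvMax_nil]
  | cons p ps ih => rw [pvMax_cons]; omega

lemma pvMax_le_four (parts : List String) : pvMax parts ≤ 4 := by
  induction parts with
  | nil => simp [pvMax_nil]
  | cons p ps ih =>
    have := pvPrio_le_four p
    rw [pvMax_cons]; omega

lemma pvPrio_le_max {p : String} {parts : List String} (h : p ∈ parts) :
    pvPrio p ≤ pvMax parts := by
  induction parts with
  | nil => cases h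
  | cons q ps ih =>
    rw [pvMax_cons]
    rcases List.mem_cons.1 h with rfl | h'
    · omega
    · have := ih h'; omega

lemma pvKeyOf_mem {parts : List String} (h : 0 < pvMax parts) :
    pvKeyOf (pvMax parts) ∈ parts := by
  induction parts with
  | nil => rw [pvMax_nil] at h; omega
  | cons p ps ih =>
    rw [pvMax_cons] at h ⊢
    by_cases hc : pvMax ps < pvPrio p
    · have hmax : max (pvPrio p) (pvMax ps) = pvPrio p := by omega
      rw [hmax]
      rcases pvPrio_cases p with ⟨_, _, _, hk⟩ | ⟨_, h0⟩
      · exact List.mem_cons.2 (Or.inl hk.symm)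
      · rw [hmax] at h; omega
    · have hmax : max (pvPrio p) (pvMax ps) = pvMax ps := by omega
      rw [hmax] at h ⊢
      exact List.mem_cons.2 (Or.inr (ih h))

-- characterization of A's fold
lemma pvFold_char (parts : List String) : ∀ (b : String) (bp : Int), 0 ≤ bp →
    parts.foldl
      (fun (st : String × Int) p =>
        if pvPriority.contains p && decide (pvPriority.getD p 0 > st.2) then
          (p, pvPriority.getD p 0)
        else st)
      (b, bp) =
    (if pvMax parts > bp then pvKeyOf (pvMax parts) else b, max bp (pvMax parts)) := by
  induction parts with
  | nil =>
    intro b bp hbp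
    simp only [List.foldl, pvMax_nil]
    rw [if_neg (by omega), max_eq_left (by omega)]
  | cons p ps ih =>
    intro b bp hbp
    have hMps := pvMax_nonneg ps
    simp only [List.foldl, pvMax_cons]
    rcases pvPrio_cases p with ⟨hc, hpos, hle, hk⟩ | ⟨hc, h0⟩
    · by_cases hgt : pvPrio p > bp
      · rw [hc, if_pos (by simp only [pvPrio] at hgt; simpa using hgt)]
        rw [show pvPriority.getD p 0 = pvPrio p from rfl]
        rw [ih p (pvPrio p) (by omega)]
        refine Prod.ext ?_ (by simp only; omega)
        simp only
        by_cases h2 : pvMax ps > pvPrio p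
        · rw [show max (pvPrio p) (pvMax ps) = pvMax ps from by omega,
            if_pos h2, if_pos (by omega)]
        · rw [show max (pvPrio p) (pvMax ps) = pvPrio p from by omega,
            if_neg h2, if_pos (by omega), ← hk]
      · rw [hc, if_neg (by simp only [pvPrio] at hgt; simpa using hgt)]
        rw [ih b bp hbp]
        refine Prod.ext ?_ (by simp only; omega)
        simp only
        split_ifs <;>
          first
            | rfl
            | (exfalso; omega)
            | (congr 1; omega)
    · rw [hc]
      simp only [Bool.false_and, Bool.false_eq_true, if_false]
      rw [ih b bp hbp]
      refine Prod.ext ?_ (by simp only; omega)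
      simp only
      split_ifs <;>
        first
          | rfl
          | (exfalso; omega)
          | (congr 1; omega)

lemma pvKeyOf_ne_unknown {v : Int} (h1 : 0 < v) (h2 : v ≤ 4) :
    pvKeyOf v ≠ "unknown" := by
  unfold pvKeyOf
  interval_cases v <;> decide

lemma pvPrio_keyOf {v : Int} (h1 : 0 < v) (h2 : v ≤ 4) : pvPrio (pvKeyOf v) = v := by
  unfold pvKeyOf
  interval_cases v <;> simp <;> decide

lemma pv_main (parts : List String) :
    (if (parts.foldl
          (fun (st : String × Int) p =>
            if pvPriority.contains p && decide (pvPriority.getD p 0 > st.2) then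
              (p, pvPriority.getD p 0)
            else st)
          ("unknown", 0)).1 ≠ "unknown" then
        (parts.foldl
          (fun (st : String × Int) p =>
            if pvPriority.contains p && decide (pvPriority.getD p 0 > st.2) then
              (p, pvPriority.getD p 0)
            else st)
          ("unknown", 0)).1
      else (PySem.List.pyGet? parts 0).getD "unknown") =
    (match pvOrder.find? (fun t => PySem.Set.contains (PySem.Set.ofList parts) t) with
      | some t => t
      | none => (PySem.List.pyGet? parts 0).getD "unknown") := by
  rw [pvFold_char parts "unknown" 0 (by omega)]
  have h0 := pvMax_nonneg parts
  have h4 := pvMax_le_four parts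
  have hnot : ∀ v : Int, 0 < v → v ≤ 4 → pvMax parts < v → pvKeyOf v ∉ parts := by
    intro v hv1 hv2 hv3 hm
    have h1 := pvPrio_le_max hm
    rw [pvPrio_keyOf hv1 hv2] at h1
    omega
  by_cases hM : 0 < pvMax parts
  · rw [if_pos hM]
    have hk := pvKeyOf_mem hM
    have hne := pvKeyOf_ne_unknown hM h4
    rw [if_pos hne]
    have hMv : pvMax parts = 1 ∨ pvMax parts = 2 ∨ pvMax parts = 3 ∨ pvMax parts = 4 := by omega
    have n4 := hnot 4 (by omega) (by omega)
    have n3 := hnot 3 (by omega) (by omega)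
    have n2 := hnot 2 (by omega) (by omega)
    norm_num [pvKeyOf] at n4 n3 n2
    simp only [pvOrder]
    rcases hMv with h | h | h | h <;> rw [h] at hk ⊢ <;> norm_num [pvKeyOf] at hk ⊢
    · rw [List.find?_cons_of_neg (by simp [n4 (by omega)]),
        List.find?_cons_of_neg (by simp [n3 (by omega)]),
        List.find?_cons_of_neg (by simp [n2 (by omega)]),
        List.find?_cons_of_pos (by simp [hk])]
    · rw [List.find?_cons_of_neg (by simp [n4 (by omega)]),
        List.find?_cons_of_neg (by simp [n3 (by omega)]),
        List.find?_cons_of_pos (by simp [hk])]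
    · rw [List.find?_cons_of_neg (by simp [n4 (by omega)]),
        List.find?_cons_of_pos (by simp [hk])]
    · rw [List.find?_cons_of_pos (by simp [hk])]
  · rw [if_neg hM, if_neg (by simp)]
    have hnone : ∀ t ∈ pvOrder, t ∉ parts := by
      intro t ht hm
      have h1 := pvPrio_le_max hm
      have h2 : 0 < pvPrio t := by
        simp only [pvOrder, List.mem_cons, List.not_mem_nil, or_false] at ht
        rcases ht with rfl | rfl | rfl | rfl <;> decide
      omega
    simp only [pvOrder]
    rw [List.find?_cons_of_neg (by simp [hnone "experimental_CLASH" (by simp [pvOrder])]),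
      List.find?_cons_of_neg (by simp [hnone "experimental_eCLIP" (by simp [pvOrder])]),
      List.find?_cons_of_neg (by simp [hnone "experimental" (by simp [pvOrder])]),
      List.find?_cons_of_neg (by simp [hnone "synthetic_shuffled" (by simp [pvOrder])])]
    rfl

-- ===== VERDICT (by name: the statement is the Claim_ definition above) =====
theorem extract_primary_evidence_py_spec : Claim_equal_extract_primary_evidence_py := by
  intro evidence_str _
  unfold Spec_extract_primary_evidence_py extract_primary_evidence_py extract_primary_evidence_py_alt
  by_cases h : evidence_str = ""
  · simp [h]
  · rw [if_neg h, if_neg h]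
    exact pv_main (((PySem.Str.split? evidence_str ";").getD []).map PySem.Str.strip)
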